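-- pv_equiv track=rewrite | github.com/nayaranunes/c- | HackerRank/basic/LsMvCp.py | systemReader
-- ===== SOURCE A (Python) =====
-- def find_command_cache(command, commands, cache):
--     if command in cache:
--         # Return cached result if available
--         return cache[command]
--
--     original_command = command
--     while command not in ['cp', 'ls', 'mv']:
--         index = int(command[1:])
--         command = commands[index]
--
--     # Store the resolved command in the cache
--     cache[original_command] = command
--     return command
--
-- def systemReader(commands):
--
--     result = [0,0,0]
--     cache = {}
--
--     for command in commands:
--         if '!' in command:
--             command = find_command_cache(command, commands, cache)
--         if command == 'cp':
--             result[0] += 1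
--         if command == 'ls':
--             result[1] += 1
--         if command == 'mv':
--             result[2] += 1
--
--     return result
-- ===== SOURCE B (Python) =====
-- def systemReader(commands):
--     counts = {'cp': 0, 'ls': 0, 'mv': 0}
--     cache = {}
--     for command in commands:
--         if '!' in command:
--             chain = []
--             while command not in ('cp', 'ls', 'mv') and command not in cache:
--                 chain.append(command)
--                 command = commands[int(command[1:])]
--             command = cache.get(command, command)
--             for link in chain:
--                 cache[link] = command
--         if command in counts:
--             counts[command] += 1
--     return [counts['cp'], counts['ls'], counts['mv']]
-- ===== Notes on version B (the rewrite author's own statement) =====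
-- stated objective: alternative
-- what changed: B resolves each '!'-reference chain with one walk that collects the whole chain and then caches the resolved command for every intermediate link (full-path memoization), counting via a single dict, instead of A's helper that caches only the chain's first element and keeps three separate result-list increments.
import Mathlib
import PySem

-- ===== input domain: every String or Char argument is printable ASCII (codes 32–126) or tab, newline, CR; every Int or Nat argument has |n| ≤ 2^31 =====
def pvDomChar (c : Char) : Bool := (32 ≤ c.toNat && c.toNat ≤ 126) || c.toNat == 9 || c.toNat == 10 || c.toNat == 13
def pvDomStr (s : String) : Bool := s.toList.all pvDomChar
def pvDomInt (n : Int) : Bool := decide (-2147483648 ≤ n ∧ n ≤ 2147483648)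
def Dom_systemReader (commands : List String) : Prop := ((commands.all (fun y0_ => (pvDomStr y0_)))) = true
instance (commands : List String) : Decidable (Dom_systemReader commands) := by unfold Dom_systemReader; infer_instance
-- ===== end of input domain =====

-- B resolves each '!'-chain once, caching every intermediate link along the path (full-path
-- memoization) and counting through a dict; same return value as A on all inputs where A returns.


-- ===== PORT A =====
-- `command not in ['cp','ls','mv']` test and the hop `commands[int(command[1:])]`,
-- shared verbatim by both Pythons.
def pvTerm (c : String) : Bool := c == "cp" || c == "ls" || c == "mv"

def pvHop? (commands : List String) (c : String) : Option String :=
  match PySem.Int.ofStr? (PySem.Str.slice c (some 1) none) with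
  | none => none
  | some k => PySem.List.pyGet? commands k

-- A's `while command not in ['cp','ls','mv']` loop; fuel makes it total
-- (none = the Python raises or diverges; such inputs are outside Pre_).
def sysALoop (commands : List String) : Nat → String → Option String
  | 0, _ => none
  | fuel+1, c =>
    if pvTerm c then some c
    else
      match pvHop? commands c with
      | none => none
      | some c' => sysALoop commands fuel c'

def pvFindCC (commands : List String) (cache : PySem.Dict String String) (c : String) :
    Option String × PySem.Dict String String :=
  match cache.get? c with
  | some v => (some v, cache)
  | none =>
    match sysALoop commands (commands.length + 2) c with
    | none => (none, cache)
    | some r => (some r, cache.insert c r)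

def pvStepCnt (cnt : Int × Int × Int) (cmd : String) : Int × Int × Int :=
  let n1 := if cmd == "cp" then (cnt.1 + 1, cnt.2.1, cnt.2.2) else cnt
  let n2 := if cmd == "ls" then (n1.1, n1.2.1 + 1, n1.2.2) else n1
  if cmd == "mv" then (n2.1, n2.2.1, n2.2.2 + 1) else n2

def sysAStep (commands : List String)
    (st : (Int × Int × Int) × PySem.Dict String String) (c : String) :
    (Int × Int × Int) × PySem.Dict String String :=
  let (res, cache') := if PySem.Str.isIn "!" c then pvFindCC commands st.2 c else (some c, st.2)
  match res with
  | none => (st.1, cache')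
  | some cmd => (pvStepCnt st.1 cmd, cache')

def systemReader (commands : List String) : List Int :=
  let st := commands.foldl (sysAStep commands) ((0, 0, 0), PySem.Dict.empty)
  [st.1.1, st.1.2.1, st.1.2.2]

-- ===== PORT B =====
-- B's inner `while command not in ('cp','ls','mv') and command not in cache`,
-- collecting the whole chain so every link can be cached afterwards.
def sysBLoop (commands : List String) (cache : PySem.Dict String String) :
    Nat → String → List String → Option (String × List String)
  | 0, _, _ => none
  | fuel+1, c, chain =>
    if !(pvTerm c) && !(cache.contains c) then
      match pvHop? commands c with
      | none => none
      | some c' => sysBLoop commands cache fuel c' (chain ++ [c])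
    else some (c, chain)

def sysBStep (commands : List String)
    (st : PySem.Dict String Int × PySem.Dict String String) (c : String) :
    PySem.Dict String Int × PySem.Dict String String :=
  let (cmd?, cache') :=
    if PySem.Str.isIn "!" c then
      match sysBLoop commands st.2 (commands.length + 2) c [] with
      | none => (none, st.2)
      | some (stp, chain) =>
        let fin := (st.2.get? stp).getD stp
        (some fin, chain.foldl (fun d l => d.insert l fin) st.2)
    else (some c, st.2)
  match cmd? with
  | none => (st.1, cache')
  | some cmd =>
    ((if st.1.contains cmd then st.1.modify cmd 0 (· + 1) else st.1), cache')

def systemReader_alt (commands : List String) : List Int :=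
  let init : PySem.Dict String Int := PySem.Dict.ofList [("cp", 0), ("ls", 0), ("mv", 0)]
  let st := commands.foldl (sysBStep commands) (init, PySem.Dict.empty)
  [st.1.getD "cp" 0, st.1.getD "ls" 0, st.1.getD "mv" 0]

-- ===== PRECONDITION & SPEC =====
-- pvIter is NOT either port's loop: it is the single reference hop `commands[int(c[1:])]`
-- iterated k times (plain function iteration, no terminal test, no cache) — the standard
-- decidable way to say 'cp/ls/mv is REACHABLE from c along the reference edges'.
def pvIter (commands : List String) : Nat → String → Option String
  | 0, c => some c
  | k+1, c =>
    match pvHop? commands c with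
    | none => none
    | some c' => pvIter commands k c'

-- Pre_ excludes EXACTLY the inputs on which A does not return: A raises
-- (ValueError/IndexError, on a malformed or out-of-range reference reached by some chain)
-- or loops forever (on a cyclic reference chain). It holds iff every command containing '!'
-- reaches 'cp'/'ls'/'mv' by iterating the hop `commands[int(command[1:])]`; a terminating
-- chain visits distinct strings of the list, hence at most `commands.length` hops suffice.
def Pre_systemReader (commands : List String) : Prop :=
  ∀ c ∈ commands, PySem.Str.isIn "!" c = true →
    ∃ k ∈ List.range (commands.length + 1),
      (match pvIter commands k c with
       | some t => pvTerm t
       | none => false) = true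

instance (commands : List String) : Decidable (Pre_systemReader commands) := by
  unfold Pre_systemReader; infer_instance

def pvWitness_systemReader : List String :=
  ["cp", "!0", "ls", "!2", "mv", "!-3", "x0"]

def Spec_systemReader (commands : List String) (out : List Int) : Prop := out = systemReader_alt commands
instance (commands : List String) (out : List Int) : Decidable (Spec_systemReader commands out) := by unfold Spec_systemReader; infer_instance

-- ===== CLAIM (what is proved, stated in full; the proofs are below) =====
def Claim_equal_systemReader : Prop := ∀ (commands : List String), Dom_systemReader commands → Pre_systemReader commands → Spec_systemReader commands (systemReader commands)

-- ===== LEMMAS AND PROOFS =====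
-- Spec-level resolved value of one command, and the cache invariant shared by both sides.
def pvRes (commands : List String) (c : String) : String :=
  if PySem.Str.isIn "!" c then (sysALoop commands (commands.length + 2) c).getD c else c

def pvInv (commands : List String) (d : PySem.Dict String String) : Prop :=
  ∀ k v, d.get? k = some v → sysALoop commands (commands.length + 2) k = some v

def pvCD (cnt : Int × Int × Int) : PySem.Dict String Int :=
  PySem.Dict.ofList [("cp", cnt.1), ("ls", cnt.2.1), ("mv", cnt.2.2)]

theorem sysALoop_succ (commands : List String) (f : Nat) (c : String) :
    sysALoop commands (f + 1) c =
      if pvTerm c then some c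
      else match pvHop? commands c with
        | none => none
        | some c' => sysALoop commands f c' := rfl

theorem sysBLoop_succ (commands : List String) (cache : PySem.Dict String String)
    (f : Nat) (c : String) (chain : List String) :
    sysBLoop commands cache (f + 1) c chain =
      if !(pvTerm c) && !(cache.contains c) then
        match pvHop? commands c with
        | none => none
        | some c' => sysBLoop commands cache f c' (chain ++ [c])
      else some (c, chain) := rfl

theorem pvRes_bang {commands : List String} {c : String}
    (h : PySem.Str.isIn "!" c = true) :
    pvRes commands c = (sysALoop commands (commands.length + 2) c).getD c := by
  unfold pvRes; rw [if_pos h]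

theorem pvRes_nobang {commands : List String} {c : String}
    (h : PySem.Str.isIn "!" c = false) : pvRes commands c = c := by
  unfold pvRes; rw [if_neg (by rw [h]; decide)]

theorem pvLoop_mono (commands : List String) :
    ∀ f f' c r, sysALoop commands f c = some r → f ≤ f' → sysALoop commands f' c = some r := by
  intro f
  induction f with
  | zero => intro f' c r h; simp [sysALoop] at h
  | succ f ih =>
    intro f' c r h hle
    obtain ⟨g, rfl⟩ : ∃ g, f' = g + 1 := ⟨f' - 1, by omega⟩
    rw [sysALoop_succ] at h ⊢
    by_cases ht : pvTerm c = true
    · rw [if_pos ht] at h ⊢; exact h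
    · rw [if_neg ht] at h ⊢
      cases hh : pvHop? commands c with
      | none => simp only [hh] at h ⊢; exact h
      | some c' =>
        simp only [hh] at h ⊢
        exact ih g c' r h (by omega)

theorem pvLoop_det (commands : List String) {f f' : Nat} {c r r' : String}
    (h : sysALoop commands f c = some r) (h' : sysALoop commands f' c = some r') : r = r' := by
  have h1 := pvLoop_mono commands f (f + f') c r h (by omega)
  have h2 := pvLoop_mono commands f' (f + f') c r' h' (by omega)
  rw [h1] at h2; exact Option.some.inj h2

-- Pre_'s iterate condition turns into successful termination of A's loop.
theorem pvIterResolves (commands : List String) :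
    ∀ f c, (∃ k, k < f ∧ ∃ t, pvIter commands k c = some t ∧ pvTerm t = true) →
      ∃ r, sysALoop commands f c = some r := by
  intro f
  induction f with
  | zero => intro c ⟨k, hk, _⟩; omega
  | succ f ih =>
    intro c ⟨k, hk, t, hit, htt⟩
    by_cases ht : pvTerm c = true
    · exact ⟨c, by rw [sysALoop_succ, if_pos ht]⟩
    · cases k with
      | zero =>
        simp only [pvIter] at hit
        cases hit; exact absurd htt ht
      | succ k' =>
        simp only [pvIter] at hit
        cases hh : pvHop? commands c with
        | none => rw [hh] at hit; cases hit
        | some c' =>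
          rw [hh] at hit
          obtain ⟨r, hr⟩ := ih c' ⟨k', by omega, t, hit, htt⟩
          refine ⟨r, ?_⟩
          rw [sysALoop_succ, if_neg ht]
          simp only [hh]
          exact hr

theorem pvResolves (commands : List String) (hpre : Pre_systemReader commands) {c : String}
    (hc : c ∈ commands) (hb : PySem.Str.isIn "!" c = true) :
    ∃ r, sysALoop commands (commands.length + 2) c = some r := by
  obtain ⟨k, hkr, hcond⟩ := hpre c hc hb
  have hk : k < commands.length + 2 := by
    have := List.mem_range.mp hkr; omega
  cases hit : pvIter commands k c with
  | none => rw [hit] at hcond; cases hcond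
  | some t =>
    rw [hit] at hcond
    exact pvIterResolves commands (commands.length + 2) c ⟨k, hk, t, hit, hcond⟩

theorem pvContains_get? {d : PySem.Dict String String} {c : String}
    (h : d.contains c = true) : ∃ v, d.get? c = some v := by
  simp only [PySem.Dict.contains, List.any_eq_true] at h
  obtain ⟨p, hp, hpc⟩ := h
  simp only [PySem.Dict.get?, Option.map_eq_some_iff]
  have hs : (d.items.find? (fun q => q.1 == c)).isSome := by
    rw [List.find?_isSome]; exact ⟨p, hp, hpc⟩
  obtain ⟨q, hq⟩ := Option.isSome_iff_exists.mp hs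
  exact ⟨q.2, q, hq, rfl⟩

theorem pvInv_insert (commands : List String) {d : PySem.Dict String String} {l v : String}
    (hinv : pvInv commands d)
    (hl : sysALoop commands (commands.length + 2) l = some v) :
    pvInv commands (d.insert l v) := by
  intro k w hk
  by_cases he : k = l
  · subst he
    rw [PySem.Dict.get?_insert_self] at hk
    cases hk; exact hl
  · rw [PySem.Dict.get?_insert_of_ne d v he] at hk
    exact hinv k w hk

theorem pvInv_fold (commands : List String) {v : String} :
    ∀ (ls : List String) (d : PySem.Dict String String), pvInv commands d →
    (∀ l ∈ ls, sysALoop commands (commands.length + 2) l = some v) →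
    pvInv commands (ls.foldl (fun d l => d.insert l v) d) := by
  intro ls
  induction ls with
  | nil => intro d hinv _; exact hinv
  | cons l ls ih =>
    intro d hinv hls
    simp only [List.foldl_cons]
    exact ih (d.insert l v)
      (pvInv_insert commands hinv (hls l (by simp)))
      (fun x hx => hls x (by simp [hx]))

-- B's chain loop, run on an invariant-respecting cache, returns the same resolved value as
-- A's loop, and every collected chain link resolves to it.
theorem pvBLoop_spec (commands : List String)
    {d : PySem.Dict String String} (hinv : pvInv commands d) :
    ∀ f, f ≤ commands.length + 2 → ∀ c chain r, sysALoop commands f c = some r →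
      ∃ stp chain', sysBLoop commands d f c chain = some (stp, chain') ∧
        ((d.get? stp).getD stp = r) ∧
        ∀ l ∈ chain', l ∈ chain ∨ sysALoop commands (commands.length + 2) l = some r := by
  intro f
  induction f with
  | zero => intro _ c chain r h; simp [sysALoop] at h
  | succ f ih =>
    intro hfle c chain r hA
    by_cases ht : pvTerm c = true
    · have hrc : r = c := by
        rw [sysALoop_succ, if_pos ht] at hA
        exact (Option.some.inj hA).symm
      subst hrc
      refine ⟨r, chain, ?_, ?_, fun l hl => Or.inl hl⟩
      · rw [sysBLoop_succ, if_neg (by simp [ht])]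
      · cases hv : d.get? r with
        | none => rfl
        | some v =>
          have h1 : sysALoop commands 1 r = some r := by
            rw [show (1 : Nat) = 0 + 1 from rfl, sysALoop_succ, if_pos ht]
          simpa using (pvLoop_det commands (hinv r v hv) h1)
    · have htf : pvTerm c = false := by
        cases h' : pvTerm c
        · rfl
        · exact absurd h' ht
      by_cases hcon : d.contains c = true
      · obtain ⟨v, hv⟩ := pvContains_get? hcon
        refine ⟨c, chain, ?_, ?_, fun l hl => Or.inl hl⟩
        · rw [sysBLoop_succ, if_neg (by rw [htf, hcon]; decide)]
        · rw [hv]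
          exact pvLoop_det commands (hinv c v hv) hA
      · have hconf : d.contains c = false := by
          cases h' : d.contains c
          · rfl
          · exact absurd h' hcon
        rw [sysALoop_succ, if_neg ht] at hA
        cases hh : pvHop? commands c with
        | none => simp only [hh] at hA; cases hA
        | some c' =>
          simp only [hh] at hA
          obtain ⟨stp, chain', hB, hfin, hmem⟩ :=
            ih (by omega) c' (chain ++ [c]) r hA
          have hcN : sysALoop commands (commands.length + 2) c = some r := by
            refine pvLoop_mono commands (f + 1) _ c r ?_ hfle
            rw [sysALoop_succ, if_neg ht]; simp only [hh]; exact hA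
          refine ⟨stp, chain', ?_, hfin, ?_⟩
          · rw [sysBLoop_succ, if_pos (by rw [htf, hconf]; decide)]
            simp only [hh]
            exact hB
          · intro l hl
            rcases hmem l hl with hin | hres
            · rcases List.mem_append.mp hin with h1 | h1
              · exact Or.inl h1
              · rw [List.mem_singleton.mp h1]; exact Or.inr hcN
            · exact Or.inr hres

theorem pvAStep_spec (commands : List String) {c : String} (cnt : Int × Int × Int)
    {d : PySem.Dict String String} (hinv : pvInv commands d)
    (hres : PySem.Str.isIn "!" c = true →
      ∃ r, sysALoop commands (commands.length + 2) c = some r) :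
    ∃ d', sysAStep commands (cnt, d) c = (pvStepCnt cnt (pvRes commands c), d') ∧
      pvInv commands d' := by
  by_cases hb : PySem.Str.isIn "!" c = true
  · obtain ⟨r, hr⟩ := hres hb
    rw [show pvStepCnt cnt (pvRes commands c) = pvStepCnt cnt r from by
      rw [pvRes_bang hb, hr]; rfl]
    cases hv : d.get? c with
    | some v =>
      have hvr : v = r := pvLoop_det commands (hinv c v hv) hr
      subst hvr
      refine ⟨d, ?_, hinv⟩
      simp only [sysAStep]
      rw [if_pos hb]
      simp only [pvFindCC, hv]
    | none =>
      refine ⟨d.insert c r, ?_, pvInv_insert commands hinv hr⟩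
      simp only [sysAStep]
      rw [if_pos hb]
      simp only [pvFindCC, hv, hr]
  · have hbf : PySem.Str.isIn "!" c = false := by
      cases h' : PySem.Str.isIn "!" c
      · rfl
      · exact absurd h' hb
    refine ⟨d, ?_, hinv⟩
    rw [pvRes_nobang hbf]
    simp only [sysAStep]
    rw [if_neg (by rw [hbf]; decide)]

theorem pvCD_mk (cnt : Int × Int × Int) :
    pvCD cnt = PySem.Dict.mk [("cp", cnt.1), ("ls", cnt.2.1), ("mv", cnt.2.2)] := rfl

theorem pvCD_count (cnt : Int × Int × Int) (cmd : String) :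
    (if (pvCD cnt).contains cmd then (pvCD cnt).modify cmd 0 (· + 1) else pvCD cnt) =
      pvCD (pvStepCnt cnt cmd) := by
  by_cases h1 : cmd = "cp"
  · subst h1
    apply PySem.Dict.ext
    simp [pvCD_mk, PySem.Dict.contains, PySem.Dict.modify, PySem.Dict.insert,
      PySem.Dict.getD, PySem.Dict.get?, pvStepCnt]
  · by_cases h2 : cmd = "ls"
    · subst h2
      apply PySem.Dict.ext
      simp [pvCD_mk, PySem.Dict.contains, PySem.Dict.modify, PySem.Dict.insert,
        PySem.Dict.getD, PySem.Dict.get?, pvStepCnt]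
    · by_cases h3 : cmd = "mv"
      · subst h3
        apply PySem.Dict.ext
        simp [pvCD_mk, PySem.Dict.contains, PySem.Dict.modify, PySem.Dict.insert,
          PySem.Dict.getD, PySem.Dict.get?, pvStepCnt]
      · have hc : (pvCD cnt).contains cmd = false := by
          simp [pvCD_mk, PySem.Dict.contains]
          exact ⟨fun h => h1 h.symm, fun h => h2 h.symm, fun h => h3 h.symm⟩
        rw [if_neg (by rw [hc]; decide)]
        have hs : pvStepCnt cnt cmd = cnt := by
          simp [pvStepCnt, show (cmd == "cp") = false from beq_eq_false_iff_ne.mpr h1,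
            show (cmd == "ls") = false from beq_eq_false_iff_ne.mpr h2,
            show (cmd == "mv") = false from beq_eq_false_iff_ne.mpr h3]
        rw [hs]

theorem pvBStep_spec (commands : List String)
    {c : String} (cnt : Int × Int × Int)
    {d : PySem.Dict String String} (hinv : pvInv commands d)
    (hres : PySem.Str.isIn "!" c = true →
      ∃ r, sysALoop commands (commands.length + 2) c = some r) :
    ∃ d', sysBStep commands (pvCD cnt, d) c = (pvCD (pvStepCnt cnt (pvRes commands c)), d') ∧
      pvInv commands d' := by
  by_cases hb : PySem.Str.isIn "!" c = true
  · obtain ⟨r, hr⟩ := hres hb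
    obtain ⟨stp, chain', hB, hfin, hl⟩ :=
      pvBLoop_spec commands hinv (commands.length + 2) (le_refl _) c [] r hr
    have hl' : ∀ l ∈ chain', sysALoop commands (commands.length + 2) l = some r := by
      intro l h
      rcases hl l h with h1 | h1
      · cases h1
      · exact h1
    have hresv : pvRes commands c = r := by rw [pvRes_bang hb, hr]; rfl
    refine ⟨chain'.foldl (fun d l => d.insert l r) d, ?_,
      pvInv_fold commands chain' d hinv hl'⟩
    rw [hresv]
    simp only [sysBStep]
    rw [if_pos hb]
    simp only [hB, hfin]
    rw [pvCD_count]
  · have hbf : PySem.Str.isIn "!" c = false := by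
      cases h' : PySem.Str.isIn "!" c
      · rfl
      · exact absurd h' hb
    refine ⟨d, ?_, hinv⟩
    rw [pvRes_nobang hbf]
    simp only [sysBStep]
    rw [if_neg (by rw [hbf]; decide)]
    simp only []
    rw [pvCD_count]

theorem pvAFold (commands : List String) :
    ∀ (l : List String) (cnt : Int × Int × Int) (d : PySem.Dict String String),
      (∀ c ∈ l, PySem.Str.isIn "!" c = true →
        ∃ r, sysALoop commands (commands.length + 2) c = some r) →
      pvInv commands d →
      ∃ d', List.foldl (sysAStep commands) (cnt, d) l =
        (List.foldl pvStepCnt cnt (l.map (pvRes commands)), d') ∧ pvInv commands d' := by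
  intro l
  induction l with
  | nil => intro cnt d _ hinv; exact ⟨d, rfl, hinv⟩
  | cons c l ih =>
    intro cnt d hres hinv
    obtain ⟨d1, h1, hinv1⟩ := pvAStep_spec commands cnt hinv (hres c (by simp))
    simp only [List.foldl_cons, List.map_cons, h1]
    exact ih (pvStepCnt cnt (pvRes commands c)) d1 (fun x hx hbx => hres x (by simp [hx]) hbx) hinv1

theorem pvBFold (commands : List String) :
    ∀ (l : List String) (cnt : Int × Int × Int) (d : PySem.Dict String String),
      (∀ c ∈ l, PySem.Str.isIn "!" c = true →
        ∃ r, sysALoop commands (commands.length + 2) c = some r) →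
      pvInv commands d →
      ∃ d', List.foldl (sysBStep commands) (pvCD cnt, d) l =
        (pvCD (List.foldl pvStepCnt cnt (l.map (pvRes commands))), d') ∧ pvInv commands d' := by
  intro l
  induction l with
  | nil => intro cnt d _ hinv; exact ⟨d, rfl, hinv⟩
  | cons c l ih =>
    intro cnt d hres hinv
    obtain ⟨d1, h1, hinv1⟩ := pvBStep_spec commands cnt hinv (hres c (by simp))
    simp only [List.foldl_cons, List.map_cons, h1]
    exact ih (pvStepCnt cnt (pvRes commands c)) d1 (fun x hx hbx => hres x (by simp [hx]) hbx) hinv1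

theorem pvInv_empty (commands : List String) : pvInv commands PySem.Dict.empty := by
  intro k v h
  simp [PySem.Dict.get?, PySem.Dict.empty] at h

-- ===== VERDICT (by name: the statement is the Claim_ definition above) =====
theorem systemReader_spec : Claim_equal_systemReader := by
  intro commands _ hpre
  unfold Spec_systemReader
  have hres : ∀ c ∈ commands, PySem.Str.isIn "!" c = true →
      ∃ r, sysALoop commands (commands.length + 2) c = some r :=
    fun c hc hb => pvResolves commands hpre hc hb
  obtain ⟨dA, hA, -⟩ := pvAFold commands commands (0, 0, 0) PySem.Dict.empty hres
    (pvInv_empty commands)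
  obtain ⟨dB, hB, -⟩ := pvBFold commands commands (0, 0, 0) PySem.Dict.empty hres
    (pvInv_empty commands)
  have hB' : List.foldl (sysBStep commands)
      ((PySem.Dict.ofList [("cp", 0), ("ls", 0), ("mv", 0)] : PySem.Dict String Int),
        PySem.Dict.empty) commands =
      (pvCD (List.foldl pvStepCnt (0, 0, 0) (commands.map (pvRes commands))), dB) := hB
  simp only [systemReader, systemReader_alt]
  rw [hA, hB']
  simp only [pvCD_mk, PySem.Dict.getD, PySem.Dict.get?, List.find?]
  simp
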